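-- pv_equiv track=rewrite | github.com/shhuan1989/algorithms | codeforces/1368D.py | solve
-- ===== SOURCE A (Python) =====
-- def solve(N, A):
--     M = 22
--     bits = [0 for _ in range(M)]
--
--     for v in A:
--         i = 0
--         while v > 0:
--             if v & 1:
--                 bits[i] += 1
--             v >>= 1
--             i += 1
--
--     ans = 0
--     i = M-1
--     while i >= 0:
--         while bits[i] > 0:
--             v = 0
--             for j in range(i, -1, -1):
--                 if bits[j] > 0:
--                     bits[j] -= 1
--                     v |= 1 << j
--             ans += v ** 2
--         i -= 1
--
--     return ans
-- ===== SOURCE B (Python) =====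
-- def solve(N, A):
--     M = 22
--     cnt = [0] * M
--     for v in A:
--         if v > 0:
--             for j in range(M):
--                 if (v >> j) & 1:
--                     cnt[j] += 1
--     ans = 0
--     for j in range(M):
--         for k in range(M):
--             ans += min(cnt[j], cnt[k]) << (j + k)
--     return ans
-- ===== Notes on version B (the rewrite author's own statement) =====
-- stated objective: alternative
-- what changed: replaces the mutating greedy that repeatedly forms one number per round (O(max-count) rounds over the bit array) with the closed form answer = sum over bit pairs (j,k) of min(cnt[j],cnt[k])*2^(j+k), computed in one O(M^2) double loop over the 22 bit counters
import Mathlib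
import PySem

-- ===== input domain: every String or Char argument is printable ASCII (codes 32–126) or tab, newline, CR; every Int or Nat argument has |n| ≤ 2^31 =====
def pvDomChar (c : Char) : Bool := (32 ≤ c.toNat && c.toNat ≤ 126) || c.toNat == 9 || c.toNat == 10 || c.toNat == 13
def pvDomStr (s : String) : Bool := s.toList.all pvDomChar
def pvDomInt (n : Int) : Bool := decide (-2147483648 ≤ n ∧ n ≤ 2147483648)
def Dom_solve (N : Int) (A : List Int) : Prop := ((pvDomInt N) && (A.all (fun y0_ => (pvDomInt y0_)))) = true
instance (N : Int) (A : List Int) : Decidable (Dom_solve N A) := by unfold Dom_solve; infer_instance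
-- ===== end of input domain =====

-- B replaces A's mutating greedy (one formed number per round, O(max-count) rounds) by the
-- closed form  answer = Σ_{j,k<22} min(cnt[j],cnt[k])·2^(j+k)  over the 22 bit counters (alternative algorithm).

-- ===== PORT A =====
-- 'while v > 0: if v & 1: bits[i] += 1; v >>= 1; i += 1'
lemma pvShiftToNatLt (v : Int) (h : 0 < v) : (v >>> (1:Nat)).toNat < v.toNat := by
  obtain ⟨m, rfl⟩ : ∃ m : Nat, v = (m : Int) := ⟨v.toNat, (Int.toNat_of_nonneg h.le).symm⟩
  have hm : 0 < m := by exact_mod_cast h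
  have : ((m : Int) >>> (1:Nat)) = ((m >>> 1 : Nat) : Int) := by exact_mod_cast rfl
  rw [this]
  simpa [Nat.shiftRight_one] using Nat.div_lt_self hm (by norm_num)

def addBits (v : Int) (i : Nat) (b : List Int) : List Int :=
  if h : 0 < v then
    addBits (v >>> (1:Nat)) (i+1)
      (if PySem.Int.band v 1 == 1 then b.set i (b.getD i 0 + 1) else b)
  else b
termination_by v.toNat
decreasing_by exact pvShiftToNatLt v h

-- 'for j in range(i, -1, -1): if bits[j] > 0: bits[j] -= 1; v |= 1 << j'
def takeOnce (j : Nat) (b : List Int) (v : Int) : Int × List Int :=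
  let p := if 0 < b.getD j 0 then
             (PySem.Int.bor v ((1:Int) <<< j), b.set j (b.getD j 0 - 1))
           else (v, b)
  match j with
  | 0 => p
  | j'+1 => takeOnce j' p.2 p.1

lemma pvGetDSet (b : List Int) (i : Nat) (x : Int) (k : Nat) :
    (b.set i x).getD k 0 = if k = i ∧ i < b.length then x else b.getD k 0 := by
  simp [List.getD, List.getElem?_set]
  split_ifs <;> simp_all

lemma pvGetDPos (b : List Int) (k : Nat) (h : 0 < b.getD k 0) : k < b.length := by
  by_contra hl
  simp [List.getD, List.getElem?_eq_none (by omega : b.length ≤ k)] at h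

lemma takeOnce_getD (j : Nat) (b : List Int) (v : Int) (k : Nat) :
    (takeOnce j b v).2.getD k 0 =
      if k ≤ j ∧ 0 < b.getD k 0 then b.getD k 0 - 1 else b.getD k 0 := by
  induction j generalizing b v with
  | zero =>
      simp only [takeOnce]
      by_cases h : 0 < b.getD 0 0
      · have hl : 0 < b.length := pvGetDPos b 0 h
        simp only [if_pos h]
        rw [pvGetDSet]
        by_cases hk : k = 0
        · subst hk; split_ifs <;> omega
        · split_ifs <;> omega
      · simp only [if_neg h]
        by_cases hk : k = 0
        · subst hk; split_ifs <;> omega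
        · split_ifs <;> omega
  | succ j ih =>
      simp only [takeOnce]
      by_cases h : 0 < b.getD (j+1) 0
      · have hl : j + 1 < b.length := pvGetDPos b (j+1) h
        simp only [if_pos h]
        rw [ih, pvGetDSet]
        by_cases hk : k = j + 1
        · subst hk; split_ifs <;> omega
        · split_ifs <;> omega
      · simp only [if_neg h]
        rw [ih]
        by_cases hk : k = j + 1
        · subst hk; split_ifs <;> omega
        · split_ifs <;> omega

-- 'while bits[i] > 0: v = 0; <inner for>; ans += v ** 2'
def innerLoop (i : Nat) (b : List Int) (ans : Int) : List Int × Int :=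
  if h : 0 < b.getD i 0 then
    innerLoop i (takeOnce i b 0).2 (ans + (takeOnce i b 0).1 ^ 2)
  else (b, ans)
termination_by (b.getD i 0).toNat
decreasing_by
  have ht := takeOnce_getD i b 0 i
  rw [if_pos ⟨le_refl i, h⟩] at ht
  omega

-- 'i = M-1; while i >= 0: …; i -= 1'
def outer : Nat → List Int → Int → Int
  | 0, b, ans => (innerLoop 0 b ans).2
  | i+1, b, ans => outer i (innerLoop (i+1) b ans).1 (innerLoop (i+1) b ans).2

def solve (N : Int) (A : List Int) : Int :=
  outer 21 (A.foldl (fun b v => addBits v 0 b) (List.replicate 22 (0:Int))) 0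

-- ===== PORT B =====
-- 'if v > 0: for j in range(M): if (v >> j) & 1: cnt[j] += 1'
def bstep (c : List Int) (v : Int) : List Int :=
  if 0 < v then
    (List.range 22).foldl
      (fun c (j : Nat) => if PySem.Int.band (v >>> j) 1 == 1 then c.set j (c.getD j 0 + 1) else c) c
  else c

-- 'for j in range(M): for k in range(M): ans += min(cnt[j], cnt[k]) << (j + k)'
def solve_alt (N : Int) (A : List Int) : Int :=
  let cnt := A.foldl bstep (List.replicate 22 (0:Int))
  (List.range 22).foldl (fun ans j =>
    (List.range 22).foldl
      (fun ans k => ans + (min (cnt.getD j 0) (cnt.getD k 0)) <<< (j+k)) ans) 0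

-- ===== PRECONDITION & SPEC =====
-- Pre_ excludes exactly the inputs where A raises IndexError: some element with a set bit
-- beyond position 21 (i.e. an element ≥ 2^22 = 4194304); A's bits array has only 22 slots.
def Pre_solve (N : Int) (A : List Int) : Prop := ∀ v ∈ A, v < 4194304
instance (N : Int) (A : List Int) : Decidable (Pre_solve N A) := by unfold Pre_solve; infer_instance

def pvWitness_solve : Int × List Int := (3, [3, 5, 7])

def Spec_solve (N : Int) (A : List Int) (out : Int) : Prop := out = solve_alt N A
instance (N : Int) (A : List Int) (out : Int) : Decidable (Spec_solve N A out) := by unfold Spec_solve; infer_instance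

-- ===== CLAIM (what is proved, stated in full; the proofs are below) =====
def Claim_equal_solve : Prop := ∀ (N : Int) (A : List Int), Dom_solve N A → Pre_solve N A → Spec_solve N A (solve N A)

-- ===== LEMMAS AND PROOFS =====

lemma takeOnce_length (j : Nat) (b : List Int) (v : Int) :
    (takeOnce j b v).2.length = b.length := by
  induction j generalizing b v with
  | zero => simp only [takeOnce]; split <;> simp
  | succ j ih => simp only [takeOnce]; split <;> simp [ih]

-- the bridge spec: V b t = value formed at threshold t; Hh b f = Σ_{t<f} (V b t)²
def ind (b : List Int) (t : Nat) (j : Nat) : Int := if (t:Int) < b.getD j 0 then 2^j else 0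
def Vv (b : List Int) (t : Nat) : Int := ∑ j ∈ Finset.range 22, ind b t j
def Hh (b : List Int) (f : Nat) : Int := ∑ t ∈ Finset.range f, (Vv b t)^2

def dec1 (b : List Int) : List Int := b.map (fun x => if 0 < x then x - 1 else x)
def decN : Nat → List Int → List Int
  | 0, b => b
  | n+1, b => decN n (dec1 b)

lemma lor_pow_add : ∀ (k q r : Nat), r < 2^k → ((2^k * q) ||| r) = 2^k * q + r := by
  intro k
  induction k with
  | zero => intro q r h; interval_cases r <;> simp
  | succ k ih =>
      intro q r h
      have h1 : 2^(k+1) * q = Nat.bit false (2^k * q) := by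
        simp [Nat.bit_val]; ring
      have h2 : r = Nat.bit (r.testBit 0) (r >>> 1) := (Nat.bit_testBit_zero_shiftRight_one r).symm
      rw [h1, h2, Nat.lor_bit]
      have hr : r >>> 1 < 2^k := by
        simp [Nat.shiftRight_one] at *; omega
      rw [ih q _ hr]
      simp [Nat.bit_val, Nat.shiftRight_one, Nat.testBit_zero]
      rcases Nat.even_or_odd r with he | ho
      · simp [Nat.even_iff.mp he]; omega
      · simp [Nat.odd_iff.mp ho]; omega

lemma pvOneShl (j : Nat) : ((1:Int) <<< j) = ((2^j : Nat) : Int) := by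
  rw [show ((1:Int) <<< j) = ((1 <<< j : Nat) : Int) from rfl, Nat.one_shiftLeft]

lemma takeOnce_fst : ∀ (j : Nat) (b : List Int) (q : Nat),
    (takeOnce j b ((2^(j+1) * q : Nat) : Int)).1 =
      ((2^(j+1) * q + ∑ l ∈ Finset.range (j+1), (if 0 < b.getD l 0 then 2^l else 0) : Nat) : Int) := by
  intro j
  induction j with
  | zero =>
      intro b q
      simp only [takeOnce]
      by_cases h : 0 < b.getD 0 0
      · simp only [if_pos h, pvOneShl, PySem.Int.bor_natCast]
        rw [lor_pow_add (0+1) q (2^0) (by norm_num)]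
        conv_rhs => rw [Finset.sum_range_succ]
        rw [if_pos h]
        simp
      · simp only [if_neg h]
        conv_rhs => rw [Finset.sum_range_succ]
        rw [if_neg h]
        simp
  | succ j ih =>
      intro b q
      simp only [takeOnce]
      by_cases h : 0 < b.getD (j+1) 0
      · simp only [if_pos h]
        have hb : PySem.Int.bor ((2^(j+1+1) * q : Nat) : Int) ((1:Int) <<< (j+1))
            = ((2^(j+1) * (2*q+1) : Nat) : Int) := by
          rw [pvOneShl, PySem.Int.bor_natCast]
          norm_cast
          rw [lor_pow_add (j+1+1) q (2^(j+1)) (Nat.pow_lt_pow_right one_lt_two (by omega))]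
          ring
        rw [hb, ih]
        have hs : ∑ l ∈ Finset.range (j+1), (if 0 < (b.set (j+1) (b.getD (j+1) 0 - 1)).getD l 0 then (2^l:Nat) else 0)
            = ∑ l ∈ Finset.range (j+1), (if 0 < b.getD l 0 then (2^l:Nat) else 0) := by
          apply Finset.sum_congr rfl
          intro l hl
          rw [pvGetDSet]
          have hne : ¬(l = j+1 ∧ j+1 < b.length) := by
            simp at hl
            rintro ⟨h1, _⟩
            omega
          rw [if_neg hne]
        rw [hs]
        conv_rhs => rw [Finset.sum_range_succ]
        rw [if_pos h]
        norm_cast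
        ring
      · simp only [if_neg h]
        have hc : ((2^(j+1+1) * q : Nat) : Int) = ((2^(j+1) * (2*q) : Nat) : Int) := by
          norm_cast
          ring
        rw [hc, ih]
        conv_rhs => rw [Finset.sum_range_succ]
        rw [if_neg h]
        norm_cast
        ring

lemma pvGetDOut (b : List Int) (k : Nat) (h : b.length ≤ k) : b.getD k 0 = 0 := by
  simp [List.getD, List.getElem?_eq_none h]

lemma pvExtGetD (a b : List Int) (hlen : a.length = b.length)
    (h : ∀ k, a.getD k 0 = b.getD k 0) : a = b := by
  apply List.ext_getElem hlen
  intro k h1 h2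
  have := h k
  simpa [List.getD, List.getElem?_eq_getElem h1, List.getElem?_eq_getElem h2] using this

lemma dec1_getD (b : List Int) (k : Nat) :
    (dec1 b).getD k 0 = if 0 < b.getD k 0 then b.getD k 0 - 1 else b.getD k 0 := by
  by_cases hk : k < b.length
  · simp [dec1, List.getD, List.getElem?_map, List.getElem?_eq_getElem hk]
  · have h1 : (dec1 b).getD k 0 = 0 := pvGetDOut _ _ (by simp [dec1]; omega)
    have h2 : b.getD k 0 = 0 := pvGetDOut _ _ (by omega)
    rw [h1, h2]
    simp

lemma dec1_length (b : List Int) : (dec1 b).length = b.length := by simp [dec1]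

lemma Vv_dec1 (b : List Int) (t : Nat) : Vv (dec1 b) t = Vv b (t+1) := by
  unfold Vv
  apply Finset.sum_congr rfl
  intro j _
  unfold ind
  rw [dec1_getD]
  push_cast
  split_ifs <;> omega

lemma inner_spec : ∀ (n : Nat) (i : Nat) (b : List Int) (ans : Int),
    (b.getD i 0).toNat = n → b.length = 22 → i < 22 →
    (∀ j, 0 ≤ b.getD j 0) → (∀ j, i < j → b.getD j 0 = 0) →
    innerLoop i b ans = (decN n b, ans + ∑ t ∈ Finset.range n, (Vv b t)^2) := by
  intro n
  induction n with
  | zero =>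
      intro i b ans hn hlen hi hpos hz
      have h0 : ¬ 0 < b.getD i 0 := by have := hpos i; omega
      rw [innerLoop, dif_neg h0]
      simp [decN]
  | succ n ih =>
      intro i b ans hn hlen hi hpos hz
      have h0 : 0 < b.getD i 0 := by omega
      rw [innerLoop, dif_pos h0]
      have hb2 : (takeOnce i b 0).2 = dec1 b := by
        apply pvExtGetD _ _ (by rw [takeOnce_length, dec1_length])
        intro k
        rw [takeOnce_getD, dec1_getD]
        by_cases hk : k ≤ i
        · simp [hk]
        · have hbk : b.getD k 0 = 0 := by
            by_cases h22 : k < 22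
            · exact hz k (by omega)
            · exact pvGetDOut _ _ (by omega)
          rw [hbk]
          simp
      have hv : (takeOnce i b 0).1 = Vv b 0 := by
        have ht := takeOnce_fst i b 0
        norm_num at ht
        rw [ht]
        unfold Vv ind
        push_cast
        have hsub : Finset.range (i+1) ⊆ Finset.range 22 := (by intro x hx; simp only [Finset.mem_range] at *; omega)
        have e : (∑ x ∈ Finset.range (i+1), (if 0 < b.getD x 0 then (2:Int)^x else 0))
            = ∑ x ∈ Finset.range 22, (if 0 < b.getD x 0 then (2:Int)^x else 0) := by
          apply Finset.sum_subset hsub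
          intro x _ hx
          simp only [Finset.mem_range] at hx
          rw [hz x (by omega)]
          simp
        simpa [List.getD] using e
      rw [hb2, hv]
      rw [ih i (dec1 b) _ (by rw [dec1_getD, if_pos h0]; omega) (by rw [dec1_length, hlen]) hi
            (by intro j; rw [dec1_getD]; have := hpos j; split_ifs <;> omega)
            (by intro j hj; rw [dec1_getD, hz j hj]; simp)]
      show _ = (decN n (dec1 b), _)
      refine Prod.ext rfl ?_
      simp only []
      have hvv : ∀ t, Vv (dec1 b) t = Vv b (t+1) := Vv_dec1 b
      rw [Finset.sum_congr rfl (fun t _ => by rw [hvv t])]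
      rw [Finset.sum_range_succ']
      ring

lemma decN_length (n : Nat) (b : List Int) : (decN n b).length = b.length := by
  induction n generalizing b with
  | zero => rfl
  | succ n ih => rw [decN, ih, dec1_length]

lemma decN_getD (n : Nat) (b : List Int) (k : Nat) (h : 0 ≤ b.getD k 0) :
    (decN n b).getD k 0 = max (b.getD k 0 - n) 0 := by
  induction n generalizing b with
  | zero => rw [decN]; rcases max_cases (b.getD k 0 - ((0:Nat):Int)) 0 with ⟨h1,h2⟩|⟨h1,h2⟩ <;> push_cast at * <;> omega
  | succ n ih =>
      rw [decN, ih _ (by rw [dec1_getD]; split_ifs <;> omega)]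
      rw [dec1_getD]
      push_cast
      rcases max_cases (b.getD k 0 - (n:Int)) 0 with ⟨h1,h2⟩|⟨h1,h2⟩ <;>
        rcases max_cases (b.getD k 0 - ((n:Int)+1)) 0 with ⟨h3,h4⟩|⟨h3,h4⟩ <;>
        split_ifs <;> omega

lemma Vv_decN (n : Nat) (b : List Int) (t : Nat) : Vv (decN n b) t = Vv b (t+n) := by
  induction n generalizing b t with
  | zero => rfl
  | succ n ih => rw [decN, ih, Vv_dec1]; rfl

lemma sum_range_split (g : Nat → Int) (a : Nat) : ∀ (c : Nat),
    ∑ t ∈ Finset.range (a+c), g t = (∑ t ∈ Finset.range a, g t) + ∑ t ∈ Finset.range c, g (a+t) := by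
  intro c
  induction c with
  | zero => simp
  | succ c ih =>
      rw [show a + (c+1) = (a+c)+1 from rfl, Finset.sum_range_succ, ih, Finset.sum_range_succ]
      ring

lemma Vv_vanish (b : List Int) (t : Nat) (hz : ∀ j, 0 < j → b.getD j 0 = 0)
    (ht : (b.getD 0 0).toNat ≤ t) (hpos : ∀ j, 0 ≤ b.getD j 0) : Vv b t = 0 := by
  unfold Vv ind
  apply Finset.sum_eq_zero
  intro j _
  by_cases hj : j = 0
  · subst hj
    rw [if_neg (by have := hpos 0; omega)]
  · rw [hz j (by omega), if_neg (by omega)]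

lemma outer_spec : ∀ (i : Nat) (f : Nat) (b : List Int) (ans : Int),
    i < 22 → b.length = 22 →
    (∀ j, 0 ≤ b.getD j 0) → (∀ j, i < j → b.getD j 0 = 0) → (∀ j, b.getD j 0 ≤ (f:Int)) →
    outer i b ans = ans + Hh b f := by
  intro i
  induction i with
  | zero =>
      intro f b ans h22 hlen hpos hz hub
      rw [outer, inner_spec (b.getD 0 0).toNat 0 b ans rfl hlen (by omega) hpos hz]
      have hc0f : (b.getD 0 0).toNat ≤ f := by have := hub 0; omega
      have hH : Hh b f = ∑ t ∈ Finset.range (b.getD 0 0).toNat, (Vv b t)^2 := by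
        unfold Hh
        symm
        apply Finset.sum_subset (by intro x hx; simp only [Finset.mem_range] at *; omega)
        intro t _ htn
        simp only [Finset.mem_range] at htn
        rw [Vv_vanish b t hz (by omega) hpos]
        ring
      rw [hH]
  | succ i ih =>
      intro f b ans h22 hlen hpos hz hub
      have hc : ((b.getD (i+1) 0).toNat : Int) = b.getD (i+1) 0 := Int.toNat_of_nonneg (hpos (i+1))
      have hcf : (b.getD (i+1) 0).toNat ≤ f := by have := hub (i+1); omega
      rw [outer, inner_spec (b.getD (i+1) 0).toNat (i+1) b ans rfl hlen h22 hpos hz]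
      simp only []
      rw [ih (f - (b.getD (i+1) 0).toNat) (decN (b.getD (i+1) 0).toNat b) _
            (by omega) (by rw [decN_length]; exact hlen)
            (by intro j; rw [decN_getD _ _ _ (hpos j)]; exact le_max_right _ _)
            (by intro j hj
                rw [decN_getD _ _ _ (hpos j)]
                by_cases hj1 : j = i+1
                · subst hj1
                  rcases max_cases (b.getD (i+1) 0 - ((b.getD (i+1) 0).toNat : Int)) 0 with ⟨h1,h2⟩|⟨h1,h2⟩ <;> omega
                · rw [hz j (by omega)]
                  rcases max_cases ((0:Int) - ((b.getD (i+1) 0).toNat : Int)) 0 with ⟨h1,h2⟩|⟨h1,h2⟩ <;> omega)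
            (by intro j
                rw [decN_getD _ _ _ (hpos j)]
                have := hub j
                have hle : (((f - (b.getD (i+1) 0).toNat : Nat)) : Int) = (f:Int) - ((b.getD (i+1) 0).toNat : Int) := by
                  push_cast [Nat.cast_sub hcf]
                  ring
                rw [hle]
                rcases max_cases (b.getD j 0 - ((b.getD (i+1) 0).toNat : Int)) 0 with ⟨h1,h2⟩|⟨h1,h2⟩ <;> omega)]
      have hHd : Hh (decN (b.getD (i+1) 0).toNat b) (f - (b.getD (i+1) 0).toNat)
          = ∑ t ∈ Finset.range (f - (b.getD (i+1) 0).toNat), (Vv b ((b.getD (i+1) 0).toNat + t))^2 := by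
        unfold Hh
        apply Finset.sum_congr rfl
        intro t _
        rw [Vv_decN, Nat.add_comm]
      have hHs : Hh b f = (∑ t ∈ Finset.range (b.getD (i+1) 0).toNat, (Vv b t)^2)
          + ∑ t ∈ Finset.range (f - (b.getD (i+1) 0).toNat), (Vv b ((b.getD (i+1) 0).toNat + t))^2 := by
        unfold Hh
        have hf : f = (b.getD (i+1) 0).toNat + (f - (b.getD (i+1) 0).toNat) := by omega
        conv_lhs => rw [hf]
        rw [sum_range_split]
      rw [hHd, hHs]
      ring

lemma addBits_getD : ∀ (k m i : Nat) (b : List Int), m < 2^k → i + k ≤ b.length →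
    (addBits (m:Int) i b).length = b.length ∧
    ∀ j, (addBits (m:Int) i b).getD j 0 =
      b.getD j 0 + (if i ≤ j ∧ (m >>> (j-i)) % 2 = 1 then 1 else 0) := by
  intro k
  induction k with
  | zero =>
      intro m i b hm hlen
      have hm0 : m = 0 := by omega
      subst hm0
      rw [addBits, dif_neg (by norm_num)]
      refine ⟨rfl, ?_⟩
      intro j
      rw [if_neg (by rintro ⟨_, hb⟩; simp [Nat.zero_shiftRight] at hb)]
      ring
  | succ k ih =>
      intro m i b hm hlen
      by_cases h0 : m = 0
      · subst h0
        rw [addBits, dif_neg (by norm_num)]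
        refine ⟨rfl, ?_⟩
        intro j
        rw [if_neg (by rintro ⟨_, hb⟩; simp [Nat.zero_shiftRight] at hb)]
        ring
      · have hpos : (0:Int) < (m:Int) := by exact_mod_cast Nat.pos_of_ne_zero h0
        rw [addBits, dif_pos hpos]
        have hsh : ((m:Int) >>> (1:Nat)) = ((m >>> 1 : Nat) : Int) := rfl
        have hb' : ∀ j, (if PySem.Int.band (m:Int) 1 == 1 then b.set i (b.getD i 0 + 1) else b).getD j 0
            = b.getD j 0 + (if j = i ∧ m % 2 = 1 then 1 else 0) := by
          intro j
          have hband : PySem.Int.band ((m:Int)) 1 = ((m &&& 1 : Nat) : Int) := by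
            exact_mod_cast PySem.Int.band_natCast m 1
          by_cases hodd : m % 2 = 1
          · have heq : (((m % 2 : Nat) : Int) = 1) := by exact_mod_cast hodd
            rw [if_pos (by rw [hband]; simp only [Nat.and_one_is_mod, beq_iff_eq]; exact heq)]
            rw [pvGetDSet]
            have hil : i < b.length := by omega
            by_cases hj : j = i
            · subst hj
              rw [if_pos ⟨rfl, hil⟩, if_pos ⟨rfl, hodd⟩]
            · rw [if_neg (by tauto), if_neg (by tauto)]
              ring
          · have hne : ¬ (((m % 2 : Nat) : Int) = 1) := by exact_mod_cast hodd
            rw [if_neg (by rw [hband]; simp only [Nat.and_one_is_mod, beq_iff_eq]; exact hne)]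
            rw [if_neg (by tauto)]
            ring
        have hb'len : (if PySem.Int.band (m:Int) 1 == 1 then b.set i (b.getD i 0 + 1) else b).length = b.length := by
          split <;> simp
        have hm2 : m >>> 1 < 2^k := by
          rw [Nat.shiftRight_one]
          rw [pow_succ] at hm
          omega
        obtain ⟨ihlen, ihget⟩ := ih (m >>> 1) (i+1)
          (if PySem.Int.band (m:Int) 1 == 1 then b.set i (b.getD i 0 + 1) else b)
          hm2 (by rw [hb'len]; omega)
        rw [hsh]
        refine ⟨by rw [ihlen, hb'len], ?_⟩
        intro j
        rw [ihget j, hb' j]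
        by_cases hj : j = i
        · subst hj
          rw [Nat.sub_self, Nat.shiftRight_zero]
          split_ifs <;> omega
        · by_cases hij : i ≤ j
          · have hshr : (m >>> 1) >>> (j - (i+1)) = m >>> (j - i) := by
              rw [← Nat.shiftRight_add]
              congr 1
              omega
            rw [hshr]
            split_ifs <;> omega
          · split_ifs <;> omega

lemma brangeFold_getD : ∀ (n : Nat) (b : List Int) (v : Int), n ≤ b.length →
    ((List.range n).foldl
      (fun c (j : Nat) => if PySem.Int.band (v >>> j) 1 == 1 then c.set j (c.getD j 0 + 1) else c) b).length = b.length ∧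
    ∀ j, ((List.range n).foldl
      (fun c (j : Nat) => if PySem.Int.band (v >>> j) 1 == 1 then c.set j (c.getD j 0 + 1) else c) b).getD j 0
      = b.getD j 0 + (if j < n ∧ PySem.Int.band (v >>> j) 1 = 1 then 1 else 0) := by
  intro n
  induction n with
  | zero =>
      intro b v _
      refine ⟨rfl, ?_⟩
      intro j
      simp only [List.range_zero, List.foldl_nil]
      split_ifs <;> omega
  | succ n ih =>
      intro b v hn
      obtain ⟨ihlen, ihget⟩ := ih b v (by omega)
      rw [List.range_succ, List.foldl_append]
      simp only [List.foldl_cons, List.foldl_nil]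
      by_cases hband : PySem.Int.band (v >>> n) 1 = 1
      · rw [if_pos (by simp [hband])]
        refine ⟨by rw [List.length_set]; exact ihlen, ?_⟩
        intro j
        by_cases hj : j = n
        · subst hj
          rw [pvGetDSet, ihlen, ihget j]
          split_ifs <;> omega
        · rw [pvGetDSet, ihlen, ihget j, ihget n]
          split_ifs <;> omega
      · rw [if_neg (by simp [hband])]
        refine ⟨ihlen, ?_⟩
        intro j
        rw [ihget j]
        by_cases hj : j = n
        · subst hj
          split_ifs <;> omega
        · split_ifs <;> omega

lemma bstep_getD (v : Int) (b : List Int) (h : b.length = 22) :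
    (bstep b v).length = 22 ∧
    ∀ j, (bstep b v).getD j 0 =
      b.getD j 0 + (if 0 < v ∧ j < 22 ∧ PySem.Int.band (v >>> j) 1 = 1 then 1 else 0) := by
  by_cases hv : 0 < v
  · obtain ⟨hlen, hget⟩ := brangeFold_getD 22 b v (by omega)
    rw [bstep, if_pos hv]
    refine ⟨by omega, ?_⟩
    intro j
    rw [hget j]
    by_cases hc : j < 22 ∧ PySem.Int.band (v >>> j) 1 = 1
    · rw [if_pos hc, if_pos ⟨hv, hc.1, hc.2⟩]
    · rw [if_neg hc, if_neg (by tauto)]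
  · rw [bstep, if_neg hv]
    refine ⟨h, ?_⟩
    intro j
    rw [if_neg (by tauto)]
    ring

set_option maxRecDepth 10000 in
lemma count_eq (v : Int) (b : List Int) (h : b.length = 22) (hv : v < 4194304) :
    addBits v 0 b = bstep b v := by
  by_cases hv0 : 0 < v
  · obtain ⟨m, rfl⟩ : ∃ m : Nat, v = (m:Int) := ⟨v.toNat, (Int.toNat_of_nonneg hv0.le).symm⟩
    have hm' : m < 4194304 := by exact_mod_cast hv
    have hm : m < 2^22 := by norm_num; omega
    obtain ⟨halen, haget⟩ := addBits_getD 22 m 0 b hm (by omega)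
    obtain ⟨hblen, hbget⟩ := bstep_getD (m:Int) b h
    apply pvExtGetD _ _ (by omega)
    intro j
    rw [haget j, hbget j]
    simp only [Nat.sub_zero]
    congr 1
    have hcast : PySem.Int.band ((m:Int) >>> j) 1 = (((m >>> j) &&& 1 : Nat) : Int) := by
      rw [show ((m:Int) >>> j) = ((m >>> j : Nat) : Int) from rfl]
      exact_mod_cast PySem.Int.band_natCast (m >>> j) 1
    by_cases hj : j < 22
    · by_cases hbit : (m >>> j) % 2 = 1
      · rw [if_pos ⟨by omega, hbit⟩,
            if_pos ⟨hv0, hj, by rw [hcast]; simp [Nat.and_one_is_mod, hbit]⟩]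
      · rw [if_neg (by rintro ⟨-, hb⟩; exact hbit hb),
            if_neg (by rw [hcast]; rintro ⟨-, -, hb⟩; rw [Nat.and_one_is_mod] at hb
                       exact hbit (by exact_mod_cast hb))]
    · have hz : m >>> j = 0 := by
        rw [Nat.shiftRight_eq_div_pow]
        have : (2:Nat)^22 ≤ 2^j := Nat.pow_le_pow_right (by norm_num) (by omega)
        exact Nat.div_eq_of_lt (by omega)
      rw [if_neg (by rw [hz]; rintro ⟨-, hb⟩; simp at hb),
          if_neg (by rintro ⟨-, hj2, -⟩; exact hj hj2)]
  · rw [addBits, dif_neg hv0, bstep, if_neg hv0]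

lemma counts_eq (A : List Int) : ∀ (b : List Int), b.length = 22 → (∀ v ∈ A, v < 4194304) →
    A.foldl (fun b v => addBits v 0 b) b = A.foldl bstep b := by
  induction A with
  | nil => intro b _ _; rfl
  | cons v A ih =>
      intro b hlen hpre
      simp only [List.foldl_cons]
      rw [count_eq v b hlen (hpre v (by simp))]
      exact ih (bstep b v) (bstep_getD v b hlen).1 (fun w hw => hpre w (by simp [hw]))

lemma cnt_bounds (A : List Int) : ∀ (b : List Int), b.length = 22 → (∀ j, 0 ≤ b.getD j 0) →
    (A.foldl bstep b).length = 22 ∧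
    (∀ j, 0 ≤ (A.foldl bstep b).getD j 0) ∧
    (∀ j, (A.foldl bstep b).getD j 0 ≤ b.getD j 0 + A.length) := by
  induction A with
  | nil => intro b hlen hpos; exact ⟨hlen, hpos, by simp⟩
  | cons v A ih =>
      intro b hlen hpos
      obtain ⟨hslen, hsget⟩ := bstep_getD v b hlen
      obtain ⟨hl, hp, hu⟩ := ih (bstep b v) hslen
        (by intro j; rw [hsget j]; have := hpos j; split_ifs <;> omega)
      refine ⟨hl, hp, ?_⟩
      intro j
      have h1 := hu j
      have h2 := hsget j
      simp only [List.foldl_cons, List.length_cons]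
      split_ifs at h2 <;> push_cast at * <;> omega

lemma sum_ite_lt (f : Nat) (m w : Int) :
    ∑ t ∈ Finset.range f, (if (t:Int) < m then w else 0) = ((min m.toNat f : Nat) : Int) * w := by
  induction f with
  | zero => simp
  | succ f ih =>
      rw [Finset.sum_range_succ, ih]
      by_cases hf : (f:Int) < m
      · rw [if_pos hf]
        have h1 : (min m.toNat (f+1) : Nat) = min m.toNat f + 1 := by omega
        rw [h1]
        push_cast
        ring
      · rw [if_neg hf]
        have h1 : (min m.toNat (f+1) : Nat) = min m.toNat f := by omega
        rw [h1]
        ring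

lemma foldl_eq_sum (g : Nat → Int) (F : Int → Nat → Int) (hF : ∀ a x, F a x = a + g x) :
    ∀ (n : Nat) (a0 : Int), (List.range n).foldl F a0 = a0 + ∑ x ∈ Finset.range n, g x := by
  intro n
  induction n with
  | zero => intro a0; simp
  | succ n ih =>
      intro a0
      rw [List.range_succ, List.foldl_append, List.foldl_cons, List.foldl_nil,
          hF, ih, Finset.sum_range_succ]
      ring

lemma pvShlNonneg (n : Int) (k : Nat) (h : 0 ≤ n) : n <<< k = n * ((2:Int)^k) := by
  obtain ⟨m, rfl⟩ : ∃ m : Nat, n = (m:Int) := ⟨n.toNat, (Int.toNat_of_nonneg h).symm⟩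
  rw [show ((m:Int) <<< k) = ((m <<< k : Nat) : Int) from rfl, Nat.shiftLeft_eq]
  push_cast
  ring

lemma alt_eq_Hh (cnt : List Int) (f : Nat)
    (hpos : ∀ j, 0 ≤ cnt.getD j 0) (hub : ∀ j, cnt.getD j 0 ≤ (f:Int)) :
    ((List.range 22).foldl (fun ans j =>
      (List.range 22).foldl
        (fun ans k => ans + (min (cnt.getD j 0) (cnt.getD k 0)) <<< (j+k)) ans) 0) = Hh cnt f := by
  have hinner : ∀ (j : Nat) (a : Int), (List.range 22).foldl
      (fun ans k => ans + (min (cnt.getD j 0) (cnt.getD k 0)) <<< (j+k)) a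
      = a + ∑ k ∈ Finset.range 22, (min (cnt.getD j 0) (cnt.getD k 0)) <<< (j+k) := by
    intro j a
    exact foldl_eq_sum _ _ (fun a x => rfl) 22 a
  rw [foldl_eq_sum (fun j => ∑ k ∈ Finset.range 22, (min (cnt.getD j 0) (cnt.getD k 0)) <<< (j+k))
        _ (fun a j => hinner j a) 22 0]
  rw [zero_add]
  unfold Hh
  have hexp2 : ∀ t, (Vv cnt t)^2 = ∑ j ∈ Finset.range 22, ∑ k ∈ Finset.range 22, ind cnt t j * ind cnt t k := by
    intro t
    rw [pow_two, Vv, Finset.sum_mul_sum]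
  rw [Finset.sum_congr rfl (fun t _ => hexp2 t)]
  symm
  rw [Finset.sum_comm]
  apply Finset.sum_congr rfl
  intro j _
  rw [Finset.sum_comm]
  apply Finset.sum_congr rfl
  intro k _
  have hmerge : ∀ t : Nat, ind cnt t j * ind cnt t k
      = (if (t:Int) < min (cnt.getD j 0) (cnt.getD k 0) then (2:Int)^j * 2^k else 0) := by
    intro t
    unfold ind
    by_cases h1 : (t:Int) < cnt.getD j 0 <;> by_cases h2 : (t:Int) < cnt.getD k 0
    · rw [if_pos h1, if_pos h2, if_pos (lt_min h1 h2)]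
    · rw [if_pos h1, if_neg h2, if_neg (by rw [lt_min_iff]; tauto)]
      ring
    · rw [if_neg h1, if_pos h2, if_neg (by rw [lt_min_iff]; tauto)]
      ring
    · rw [if_neg h1, if_neg h2, if_neg (by rw [lt_min_iff]; tauto)]
      ring
  have hm0 : 0 ≤ min (cnt.getD j 0) (cnt.getD k 0) := le_min (hpos j) (hpos k)
  have hmf : (min (cnt.getD j 0) (cnt.getD k 0)).toNat ≤ f := by
    have := hub j
    have h2 : min (cnt.getD j 0) (cnt.getD k 0) ≤ cnt.getD j 0 := min_le_left _ _
    omega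
  have h1 : (min (min (cnt.getD j 0) (cnt.getD k 0)).toNat f : Nat) = (min (cnt.getD j 0) (cnt.getD k 0)).toNat := by omega
  rw [Finset.sum_congr rfl (fun t _ => hmerge t), sum_ite_lt, h1,
      pvShlNonneg _ _ hm0, Int.toNat_of_nonneg hm0, pow_add]

-- ===== VERDICT (by name: the statement is the Claim_ definition above) =====
theorem solve_spec : Claim_equal_solve := by
  intro N A _ hpre
  unfold Spec_solve
  have hrep_len : (List.replicate 22 (0:Int)).length = 22 := by simp
  have hrep_getD : ∀ j, (List.replicate 22 (0:Int)).getD j 0 = 0 := by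
    intro j
    rw [show (List.replicate 22 (0:Int)).getD j 0 = ((List.replicate 22 (0:Int))[j]?).getD 0 from rfl,
        List.getElem?_replicate]
    split_ifs <;> rfl
  obtain ⟨hclen, hcpos, hcub⟩ := cnt_bounds A (List.replicate 22 0) hrep_len
    (by intro j; rw [hrep_getD])
  have hub' : ∀ j, (A.foldl bstep (List.replicate 22 (0:Int))).getD j 0 ≤ (A.length : Int) := by
    intro j
    have h1 := hcub j
    rw [hrep_getD] at h1
    omega
  have hzero : ∀ j, 21 < j → (A.foldl bstep (List.replicate 22 (0:Int))).getD j 0 = 0 := by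
    intro j hj
    exact pvGetDOut _ _ (by omega)
  have hA : solve N A = Hh (A.foldl bstep (List.replicate 22 (0:Int))) A.length := by
    unfold solve
    rw [counts_eq A _ hrep_len hpre]
    rw [outer_spec 21 A.length _ 0 (by omega) hclen hcpos hzero hub']
    ring
  rw [hA]
  exact (alt_eq_Hh (A.foldl bstep (List.replicate 22 (0:Int))) A.length hcpos hub').symm
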